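-- pv_equiv track=rewrite | github.com/OATML-Markslab/ProteinNPT | proteinnpt/utils/model_utils.py | collapse_triplets
-- ===== SOURCE A (Python) =====
-- def collapse_triplets(s):
--     triplets = s.split(":")
--     positions = {}
--     for triplet in triplets:
--         pos = triplet[1:-1]
--         aa1, aa2 = triplet[0], triplet[-1]
--         if pos in positions:
--             positions[pos] = positions[pos][:-1] + aa2
--         else:
--             positions[pos] = aa1 + pos + aa2
--     s_new = ":".join([aa for aa in positions.values()])
--     return s_new
-- ===== SOURCE B (Python) =====
-- def collapse_triplets(s):
--     # Recursive partition: take the leading triplet, collapse its whole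
--     # position-group at once (first's leading char + position + last's
--     # trailing char), then recurse on the triplets at other positions.
--     def collapse(ts):
--         if not ts:
--             return []
--         head, rest = ts[0], ts[1:]
--         pos = head[1:-1]
--         same = [t for t in rest if t[1:-1] == pos]
--         last = same[-1] if same else head
--         token = head[0] + pos + last[-1]
--         return [token] + collapse([t for t in rest if t[1:-1] != pos])
--     return ":".join(collapse(s.split(":")))
-- ===== Notes on version B (the rewrite author's own statement) =====
-- stated objective: alternative
-- what changed: B replaces A's iterative dict of assembled tokens updated in place by a recursive partition with no dict at all: peel the leading triplet, emit its whole position-group's token at once (head's first char + position + last same-position triplet's last char), and recurse on the triplets at the remaining positions.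
-- outside the precondition, e.g. on collapse_triplets(':'): A raises IndexError, B raises IndexError; on collapse_triplets('::'): A raises IndexError, B raises IndexError
import Mathlib
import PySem

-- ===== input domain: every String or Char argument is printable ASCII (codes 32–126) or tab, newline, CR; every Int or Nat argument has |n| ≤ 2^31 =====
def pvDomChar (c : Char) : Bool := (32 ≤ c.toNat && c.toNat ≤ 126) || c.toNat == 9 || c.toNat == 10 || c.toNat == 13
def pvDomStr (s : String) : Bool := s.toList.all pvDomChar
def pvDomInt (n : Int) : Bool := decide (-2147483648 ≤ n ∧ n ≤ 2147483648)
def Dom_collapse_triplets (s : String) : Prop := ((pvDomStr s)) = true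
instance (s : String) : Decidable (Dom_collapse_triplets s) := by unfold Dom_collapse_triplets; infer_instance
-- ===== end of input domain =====

-- B collapses the triplet list by recursive partition on the leading triplet's position
-- (no dict, no in-place token surgery); objective: alternative decomposition.

-- shared helper: triplet[1:-1]
def ctMid (t : List Char) : List Char := PySem.List.slice t (some 1) (some (-1))

-- ===== PORT A =====
-- one iteration of A's for-loop over the running dict positions : pos ↦ assembled token
def ctStepA (d : PySem.Dict (List Char) (List Char)) (t : List Char) :
    PySem.Dict (List Char) (List Char) :=
  let pos := ctMid t
  let aa1 := (PySem.List.pyGet? t 0).getD ' '    -- triplet[0]; none = IndexError, excluded by Pre_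
  let aa2 := (PySem.List.pyGet? t (-1)).getD ' ' -- triplet[-1]
  if d.contains pos then
    d.insert pos (PySem.List.slice ((d.get? pos).getD []) none (some (-1)) ++ [aa2])
  else
    d.insert pos ([aa1] ++ pos ++ [aa2])

def collapse_triplets (s : String) : String :=
  let triplets := (PySem.Chars.split? s.toList [':']).getD []
  let positions := triplets.foldl ctStepA PySem.Dict.empty
  String.ofList (PySem.Chars.join [':'] positions.values)

-- ===== PORT B =====
-- def collapse(ts): peel ts[0], token its whole position-group, recurse on the other positions
def ctCollapse (ts : List (List Char)) : List (List Char) :=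
  match ts with
  | [] => []
  | head :: rest =>
    let pos := ctMid head
    let same := rest.filter (fun t => ctMid t == pos)
    let lastT := same.getLast?.getD head                     -- same[-1] if same else head
    let token := [(PySem.List.pyGet? head 0).getD ' '] ++ pos
                   ++ [(PySem.List.pyGet? lastT (-1)).getD ' ']
    token :: ctCollapse (rest.filter (fun t => !(ctMid t == pos)))
termination_by ts.length
decreasing_by
  simp only [List.unattach_filter, List.unattach_attach, List.length_cons]
  exact Nat.lt_succ_of_le (List.length_filter_le _ _)

def collapse_triplets_alt (s : String) : String :=
  String.ofList (PySem.Chars.join [':']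
    (ctCollapse ((PySem.Chars.split? s.toList [':']).getD [])))

-- ===== PRECONDITION & SPEC =====
-- Pre_ excludes exactly the inputs where s.split(":") yields an empty piece (empty s, leading/
-- trailing ':' or '::'): there A raises IndexError on triplet[0].
def Pre_collapse_triplets (s : String) : Prop :=
  ∀ t ∈ PySem.Chars.splitOn s.toList [':'], t ≠ []
instance (s : String) : Decidable (Pre_collapse_triplets s) := by unfold Pre_collapse_triplets; infer_instance
def pvWitness_collapse_triplets : String := "A1B:B1C:X2Y"

def Spec_collapse_triplets (s : String) (out : String) : Prop := out = collapse_triplets_alt s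
instance (s : String) (out : String) : Decidable (Spec_collapse_triplets s out) := by unfold Spec_collapse_triplets; infer_instance

-- ===== CLAIM (what is proved, stated in full; the proofs are below) =====
def Claim_equal_collapse_triplets : Prop := ∀ (s : String), Dom_collapse_triplets s → Pre_collapse_triplets s → Spec_collapse_triplets s (collapse_triplets s)

-- ===== LEMMAS AND PROOFS =====

-- first-seen deduplication, in the recursive filter form that matches B's recursion
def fsDedup : List (List Char) → List (List Char)
  | [] => []
  | a :: l => a :: fsDedup (l.filter (fun b => !(b == a)))
termination_by l => l.length
decreasing_by
  simp only [List.unattach_filter, List.unattach_attach, List.length_cons]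
  exact Nat.lt_succ_of_le (List.length_filter_le _ _)

-- the token both programs produce for position m within the triplet list ts
def ctTok (ts : List (List Char)) (m : List Char) : List Char :=
  [(PySem.List.pyGet? (((ts.filter (fun t => ctMid t == m)).head?).getD []) 0).getD ' ']
    ++ m
    ++ [(PySem.List.pyGet? (((ts.filter (fun t => ctMid t == m)).getLast?).getD []) (-1)).getD ' ']

theorem mem_fsDedup (a : List Char) (l : List (List Char)) : a ∈ fsDedup l ↔ a ∈ l := by
  induction l using fsDedup.induct with
  | case1 => simp [fsDedup]
  | case2 b l ih =>
    simp only [List.unattach_filter, List.unattach_attach] at ih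
    rw [fsDedup]
    constructor
    · intro h
      rcases List.mem_cons.mp h with h | h
      · simp [h]
      · rcases (List.mem_filter.mp (ih.mp h)) with ⟨h1, _⟩
        exact List.mem_cons_of_mem _ h1
    · intro h
      rcases List.mem_cons.mp h with h | h
      · simp [h]
      · by_cases hab : a = b
        · simp [hab]
        · exact List.mem_cons_of_mem _ (ih.mpr (List.mem_filter.mpr ⟨h, by simp [hab]⟩))

theorem nodup_fsDedup (l : List (List Char)) : (fsDedup l).Nodup := by
  induction l using fsDedup.induct with
  | case1 => simp [fsDedup]
  | case2 b l ih =>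
    simp only [List.unattach_filter, List.unattach_attach] at ih
    rw [fsDedup]
    refine List.nodup_cons.mpr ⟨fun hmem => ?_, ih⟩
    have := List.mem_filter.mp ((mem_fsDedup _ _).mp hmem)
    simp at this

theorem fsDedup_append (l : List (List Char)) (x : List Char) :
    fsDedup (l ++ [x]) = if x ∈ l then fsDedup l else fsDedup l ++ [x] := by
  induction l using fsDedup.induct with
  | case1 => simp [fsDedup]
  | case2 b l ih =>
    simp only [List.unattach_filter, List.unattach_attach] at ih
    rw [List.cons_append, fsDedup, fsDedup, List.filter_append]
    by_cases hxb : x = b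
    · simp [hxb]
    · have hfx : List.filter (fun c => !(c == b)) [x] = [x] := by simp [hxb]
      rw [hfx, ih]
      by_cases hx : x ∈ l
      · have : x ∈ List.filter (fun c => !(c == b)) l := List.mem_filter.mpr ⟨hx, by simp [hxb]⟩
        simp [this, hx]
      · have : x ∉ List.filter (fun c => !(c == b)) l := fun hc => hx (List.mem_filter.mp hc).1
        simp [this, hx, hxb]

-- B computes, position by first-seen position, the token of that position's whole group
theorem ctCollapse_eq (ts : List (List Char)) :
    ctCollapse ts = (fsDedup (ts.map ctMid)).map (ctTok ts) := by
  induction ts using ctCollapse.induct with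
  | case1 => rw [ctCollapse]; simp [fsDedup]
  | case2 head rest pos ih =>
    simp only [List.unattach_filter, List.unattach_attach] at ih
    rw [ctCollapse]
    simp only [List.map_cons, fsDedup, List.map_cons]
    refine List.cons_eq_cons.mpr ⟨?_, ?_⟩
    · -- head token = ctTok (head :: rest) (ctMid head)
      have hfil : (head :: rest).filter (fun t => ctMid t == ctMid head)
          = head :: rest.filter (fun t => ctMid t == ctMid head) := by
        simp
      rw [ctTok, hfil]
      cases hsame : rest.filter (fun t => ctMid t == ctMid head) with
      | nil => simp
      | cons u v =>
        have hlast : (head :: u :: v).getLast? = (u :: v).getLast? := List.getLast?_cons_cons ..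
        simp only [List.head?_cons, Option.getD_some, hlast]
        cases h2 : (u :: v).getLast? with
        | none => simp at h2
        | some w => simp
    · -- tail: recurse on the triplets at other positions
      rw [ih]
      have hmap : (rest.filter (fun t => !(ctMid t == ctMid head))).map ctMid
          = (rest.map ctMid).filter (fun b => !(b == ctMid head)) := by
        rw [List.filter_map]; rfl
      rw [hmap]
      refine List.map_congr_left ?_
      intro m hm
      have hmne : m ≠ ctMid head := by
        have := List.mem_filter.mp ((mem_fsDedup _ _).mp hm)
        simpa using this.2
      have h1 : (head :: rest).filter (fun t => ctMid t == m)
          = rest.filter (fun t => ctMid t == m) := by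
        simp [Ne.symm hmne]
      have h2 : (rest.filter (fun t => !(ctMid t == ctMid head))).filter (fun t => ctMid t == m)
          = rest.filter (fun t => ctMid t == m) := by
        rw [List.filter_filter]
        refine List.filter_congr ?_
        intro t _
        by_cases hc : ctMid t = m
        · simp [hc, hmne]
        · simp [hc]
      rw [ctTok, ctTok, h1, h2]

-- updating the stored token (drop its last char, append t's last char) is exactly the
-- token of the group extended with t
theorem ctTok_update (ts : List (List Char)) (t m : List Char)
    (hmt : ctMid t = m) (hgne : ts.filter (fun u => ctMid u == m) ≠ []) :
    (ctTok ts m).dropLast ++ [(PySem.List.pyGet? t (-1)).getD ' ']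
      = ctTok (ts ++ [t]) m := by
  have hflt : (ts ++ [t]).filter (fun u => ctMid u == m)
      = ts.filter (fun u => ctMid u == m) ++ [t] := by
    rw [List.filter_append]; simp [hmt]
  rw [ctTok, ctTok, hflt]
  rw [List.dropLast_concat, List.head?_append_of_ne_nil _ hgne, List.getLast?_concat]
  simp

-- A's dict after the loop: one entry per first-seen position, holding that position's token
theorem foldA_items (ts : List (List Char)) :
    (ts.foldl ctStepA PySem.Dict.empty).items
      = (fsDedup (ts.map ctMid)).map (fun m => (m, ctTok ts m)) := by
  induction ts using List.reverseRecOn with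
  | nil => simp [fsDedup]; rfl
  | append_singleton ts t ih =>
    rw [List.foldl_append, List.foldl_cons, List.foldl_nil]
    have hkeys : (ts.foldl ctStepA PySem.Dict.empty).keys = fsDedup (ts.map ctMid) := by
      show (ts.foldl ctStepA PySem.Dict.empty).items.map Prod.fst = _
      have hcomp : (Prod.fst ∘ fun m : List Char => (m, ctTok ts m)) = id := rfl
      rw [ih, List.map_map, hcomp, List.map_id]
    have hcont : ∀ m, (ts.foldl ctStepA PySem.Dict.empty).contains m
        = decide (m ∈ ts.map ctMid) := by
      intro m
      rw [PySem.Dict.contains_eq_decide_mem_keys, hkeys]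
      rw [decide_eq_decide]
      exact mem_fsDedup _ _
    have hmapmid : (ts ++ [t]).map ctMid = ts.map ctMid ++ [ctMid t] := by simp
    have htok_ne : ∀ m, m ≠ ctMid t → ctTok (ts ++ [t]) m = ctTok ts m := by
      intro m hm
      have hflt : (ts ++ [t]).filter (fun u => ctMid u == m)
          = ts.filter (fun u => ctMid u == m) := by
        rw [List.filter_append]
        simp [Ne.symm hm]
      rw [ctTok, ctTok, hflt]
    rw [ctStepA]
    by_cases hmem : ctMid t ∈ ts.map ctMid
    · -- A updates the existing token in place
      rw [if_pos (by rw [hcont]; simpa using hmem)]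
      have hget : (ts.foldl ctStepA PySem.Dict.empty).get? (ctMid t)
          = some (ctTok ts (ctMid t)) := by
        apply PySem.Dict.get?_of_mem_items
        · rw [ih]
          exact List.mem_map.mpr ⟨ctMid t, (mem_fsDedup _ _).mpr hmem, rfl⟩
        · rw [hkeys]; exact nodup_fsDedup _
      rw [PySem.Dict.items_insert_of_contains _ _ (by rw [hcont]; simpa using hmem), ih]
      rw [hmapmid, fsDedup_append, if_pos hmem, List.map_map]
      refine List.map_congr_left ?_
      intro m hm
      by_cases hmm : m = ctMid t
      · have hgne : ts.filter (fun u => ctMid u == m) ≠ [] := by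
          rcases List.mem_map.mp hmem with ⟨u, hu, hmid⟩
          intro hnil
          exact (List.filter_eq_nil_iff.mp hnil) u hu (by simp [hmid, hmm])
        simp only [Function.comp, hmm, BEq.rfl, if_true]
        refine congrArg _ ?_
        rw [hget]
        simp only [Option.getD_some]
        rw [PySem.List.slice_to_neg_one, ← hmm]
        exact ctTok_update ts t m hmm.symm hgne
      · simp only [Function.comp]
        rw [if_neg (by simpa using hmm), htok_ne m hmm]
    · -- new position: A appends a fresh entry
      rw [if_neg (by rw [hcont]; simpa using hmem)]
      rw [PySem.Dict.items_insert_of_not_contains _ _ (by rw [hcont]; simpa using hmem), ih]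
      rw [hmapmid, fsDedup_append, if_neg hmem, List.map_append]
      refine congrArg₂ _ ?_ ?_
      · refine List.map_congr_left ?_
        intro m hm
        have : m ≠ ctMid t := fun h => hmem (h ▸ (mem_fsDedup _ _).mp hm)
        rw [htok_ne m this]
      · -- the fresh entry's value is the token of the singleton group [t]
        have hflt : (ts ++ [t]).filter (fun u => ctMid u == ctMid t) = [t] := by
          rw [List.filter_append]
          have : ts.filter (fun u => ctMid u == ctMid t) = [] := by
            rw [List.filter_eq_nil_iff]
            intro u hu hbeq
            exact hmem (List.mem_map.mpr ⟨u, hu, by simpa using hbeq⟩)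
          simp [this]
        simp only [List.map_cons, List.map_nil]
        rw [ctTok, hflt]
        simp

-- ===== VERDICT (by name: the statement is the Claim_ definition above) =====
theorem collapse_triplets_spec : Claim_equal_collapse_triplets := by
  intro s _ _
  unfold Spec_collapse_triplets
  simp only [collapse_triplets, collapse_triplets_alt]
  refine congrArg _ (congrArg _ ?_)
  rw [ctCollapse_eq]
  show ((_ : PySem.Dict (List Char) (List Char)).items.map Prod.snd) = _
  rw [foldA_items, List.map_map]
  rfl
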